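-- pv_equiv track=rewrite | github.com/removetooth/stereosco.py | stereoscopy/3dGraph.py | vecMtxMultiply3
-- ===== SOURCE A (Python) =====
-- def vecMtxMultiply3(A, x):
--     temp = []
--     for i in range(0,9,3):
--         temp.append(
--             x[0] * A[i] +
--             x[1] * A[i+1] +
--             x[2] * A[i+2]
--             )
--     return tuple(temp)
-- ===== SOURCE B (Python) =====
-- def vecMtxMultiply3(A, x):
--     temp = [0, 0, 0]
--     for j in range(3):
--         xj = x[j]
--         for r, base in enumerate((0, 3, 6)):
--             temp[r] += xj * A[base + j]
--     return tuple(temp)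
-- ===== Notes on version B (the rewrite author's own statement) =====
-- stated objective: alternative
-- what changed: Computes the product column by column, accumulating each x[j]'s contribution into all three rows of a result accumulator, instead of forming each row's dot product in one expression.
import Mathlib
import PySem

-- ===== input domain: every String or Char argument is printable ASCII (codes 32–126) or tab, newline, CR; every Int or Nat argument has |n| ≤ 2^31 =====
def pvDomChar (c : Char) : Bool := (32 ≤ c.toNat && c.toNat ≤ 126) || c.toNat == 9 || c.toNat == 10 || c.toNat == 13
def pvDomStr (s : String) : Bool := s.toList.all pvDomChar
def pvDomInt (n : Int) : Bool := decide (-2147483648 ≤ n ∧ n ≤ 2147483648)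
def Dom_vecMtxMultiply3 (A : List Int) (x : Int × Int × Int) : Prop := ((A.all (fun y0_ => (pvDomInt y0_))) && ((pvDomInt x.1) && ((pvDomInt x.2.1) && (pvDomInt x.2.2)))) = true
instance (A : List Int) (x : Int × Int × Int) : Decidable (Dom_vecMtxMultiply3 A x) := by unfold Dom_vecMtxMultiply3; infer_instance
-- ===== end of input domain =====

-- B builds the result column by column with an accumulator instead of A's row-by-row dot products (alternative decomposition, same cost).

-- ===== PORT A =====
-- temp = []; for i in range(0,9,3): temp.append(x[0]*A[i] + x[1]*A[i+1] + x[2]*A[i+2]); return tuple(temp)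
def vecMtxMultiply3 (A : List Int) (x : Int × Int × Int) : Int × Int × Int :=
  let temp : List Int :=
    (PySem.List.pyRange 0 9 3).foldl (fun temp i =>
      temp ++ [x.1 * PySem.List.pyGetD A i 0 +
               x.2.1 * PySem.List.pyGetD A (i + 1) 0 +
               x.2.2 * PySem.List.pyGetD A (i + 2) 0]) []
  -- tuple(temp): temp has exactly 3 elements here
  (temp.getD 0 0, temp.getD 1 0, temp.getD 2 0)

-- ===== PORT B =====
-- temp=[0,0,0]; for j in range(3): for r, base in enumerate((0,3,6)): temp[r] += x[j]*A[base+j]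
def vecMtxMultiply3_alt (A : List Int) (x : Int × Int × Int) : Int × Int × Int :=
  let xs : List Int := [x.1, x.2.1, x.2.2]
  let temp : List Int :=
    (PySem.List.pyRange 0 3 1).foldl (fun temp j =>
      let xj := PySem.List.pyGetD xs j 0
      -- enumerate((0,3,6)) = [(0,0),(1,3),(2,6)]
      ([((0:Nat),(0:Int)), (1,3), (2,6)]).foldl (fun (t : List Int) rb =>
        t.set rb.1 (t.getD rb.1 0 + xj * PySem.List.pyGetD A (rb.2 + j) 0)) temp)
      [0, 0, 0]
  (temp.getD 0 0, temp.getD 1 0, temp.getD 2 0)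

-- ===== PRECONDITION & SPEC =====
-- A indexes A[0]..A[8]; on lists shorter than 9 the Python raises IndexError, excluded here.
def Pre_vecMtxMultiply3 (A : List Int) (x : Int × Int × Int) : Prop := 9 ≤ A.length
instance (A : List Int) (x : Int × Int × Int) : Decidable (Pre_vecMtxMultiply3 A x) := by unfold Pre_vecMtxMultiply3; infer_instance
def pvWitness_vecMtxMultiply3 : List Int × (Int × Int × Int) := ([1, 2, 3, 4, 5, 6, 7, 8, 9], (1, -2, 3))

def Spec_vecMtxMultiply3 (A : List Int) (x : Int × Int × Int) (out : Int × Int × Int) : Prop := out = vecMtxMultiply3_alt A x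
instance (A : List Int) (x : Int × Int × Int) (out : Int × Int × Int) : Decidable (Spec_vecMtxMultiply3 A x out) := by unfold Spec_vecMtxMultiply3; infer_instance

-- ===== CLAIM (what is proved, stated in full; the proofs are below) =====
def Claim_equal_vecMtxMultiply3 : Prop := ∀ (A : List Int) (x : Int × Int × Int), Dom_vecMtxMultiply3 A x → Pre_vecMtxMultiply3 A x → Spec_vecMtxMultiply3 A x (vecMtxMultiply3 A x)

-- ===== LEMMAS AND PROOFS =====

-- ===== VERDICT (by name: the statement is the Claim_ definition above) =====
theorem vecMtxMultiply3_spec : Claim_equal_vecMtxMultiply3 := by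
  intro A x _ hpre
  unfold Spec_vecMtxMultiply3 Pre_vecMtxMultiply3 at *
  obtain ⟨a0, A, h⟩ : ∃ a A', A = a :: A' := by cases A with | nil => simp at hpre | cons a t => exact ⟨a, t, rfl⟩
  subst h
  obtain ⟨a1, A, h⟩ : ∃ a A', A = a :: A' := by cases A with | nil => simp at hpre | cons a t => exact ⟨a, t, rfl⟩
  subst h
  obtain ⟨a2, A, h⟩ : ∃ a A', A = a :: A' := by cases A with | nil => simp at hpre | cons a t => exact ⟨a, t, rfl⟩
  subst h
  obtain ⟨a3, A, h⟩ : ∃ a A', A = a :: A' := by cases A with | nil => simp at hpre | cons a t => exact ⟨a, t, rfl⟩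
  subst h
  obtain ⟨a4, A, h⟩ : ∃ a A', A = a :: A' := by cases A with | nil => simp at hpre | cons a t => exact ⟨a, t, rfl⟩
  subst h
  obtain ⟨a5, A, h⟩ : ∃ a A', A = a :: A' := by cases A with | nil => simp at hpre | cons a t => exact ⟨a, t, rfl⟩
  subst h
  obtain ⟨a6, A, h⟩ : ∃ a A', A = a :: A' := by cases A with | nil => simp at hpre | cons a t => exact ⟨a, t, rfl⟩
  subst h
  obtain ⟨a7, A, h⟩ : ∃ a A', A = a :: A' := by cases A with | nil => simp at hpre | cons a t => exact ⟨a, t, rfl⟩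
  subst h
  obtain ⟨a8, A, h⟩ : ∃ a A', A = a :: A' := by cases A with | nil => simp at hpre | cons a t => exact ⟨a, t, rfl⟩
  subst h
  simp only [vecMtxMultiply3, vecMtxMultiply3_alt,
    show PySem.List.pyRange 0 9 3 = [0, 3, 6] from by decide,
    show PySem.List.pyRange 0 3 1 = [0, 1, 2] from by decide,
    List.foldl]
  norm_num [PySem.List.pyGetD_ofNat', List.getD]
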